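-- pv_equiv track=rewrite | github.com/ElbekMeliqoziyev/dars_10 | problem_7.py | natural
-- ===== SOURCE A (Python) =====
-- def natural(x):
--     for i in x:
--         s=0
--         a=0
--         if i>0:
--             while i!=0:
--                 a=i%10
--                 s+=a
--                 i//=10
--             yield s
-- ===== SOURCE B (Python) =====
-- def natural(x):
--     return (sum(int(c) for c in str(i)) for i in x if i > 0)
-- ===== Notes on version B (the rewrite author's own statement) =====
-- stated objective: idiomatic
-- what changed: B is a one-line generator expression that sums each positive number's decimal-string characters instead of peeling digits with a %10 / //=10 while loop and explicit accumulators.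
import Mathlib
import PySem

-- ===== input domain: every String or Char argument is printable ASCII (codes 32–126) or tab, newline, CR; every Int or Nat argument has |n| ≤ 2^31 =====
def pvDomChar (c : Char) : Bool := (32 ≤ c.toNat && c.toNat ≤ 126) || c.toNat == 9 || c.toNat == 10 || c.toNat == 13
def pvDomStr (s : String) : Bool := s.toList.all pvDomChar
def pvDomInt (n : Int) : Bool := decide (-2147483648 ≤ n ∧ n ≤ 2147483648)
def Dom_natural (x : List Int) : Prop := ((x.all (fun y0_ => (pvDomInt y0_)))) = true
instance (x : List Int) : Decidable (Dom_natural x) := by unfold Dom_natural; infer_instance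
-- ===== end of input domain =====

-- B replaces A's %10 / //=10 digit-peeling loop with a generator expression summing the
-- characters of each positive number's decimal string (objective: idiomatic).


-- ===== PORT A =====
-- A's inner while loop; it is only entered with i > 0 and i //= 10 keeps i ≥ 0,
-- so along the loop `i != 0` is equivalent to `0 < i`, which we use as the guard
-- to establish termination.
def natLoop (i s : Int) : Int :=
  if 0 < i then natLoop (PySem.Int.floordiv i 10) (s + PySem.Int.mod i 10) else s
termination_by i.toNat
decreasing_by
  rw [PySem.Int.floordiv_eq_ediv_of_pos (by norm_num : (0:Int) < 10)]
  omega

def natural (x : List Int) : List Int :=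
  x.foldl (fun acc i => if 0 < i then acc ++ [natLoop i 0] else acc) []

-- ===== PORT B =====
-- int(c) ported as the character's code minus 48: exact on the digit characters
-- that str(i) produces for i > 0.
def digitVal (c : Char) : Int := (c.toNat : Int) - 48

def natural_alt (x : List Int) : List Int :=
  (x.filter (fun i => decide (0 < i))).map
    (fun i => ((PySem.Int.toStr i).toList.map digitVal).sum)

-- ===== PRECONDITION & SPEC =====
def Spec_natural (x : List Int) (out : List Int) : Prop := out = natural_alt x
instance (x : List Int) (out : List Int) : Decidable (Spec_natural x out) := by unfold Spec_natural; infer_instance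

-- ===== CLAIM (what is proved, stated in full; the proofs are below) =====
def Claim_equal_natural : Prop := ∀ (x : List Int), Dom_natural x → Spec_natural x (natural x)

-- ===== LEMMAS AND PROOFS =====

-- digit sum of a natural number, recursively (proof-only helper)
def dsum (n : Nat) : Nat :=
  if n = 0 then 0 else n % 10 + dsum (n / 10)
termination_by n
decreasing_by exact Nat.div_lt_self (by omega) (by omega)

def csum (l : List Char) : Int := (l.map digitVal).sum

theorem digitChar_toNat (d : Nat) (h : d < 10) : (Nat.digitChar d).toNat = d + 48 := by
  interval_cases d <;> rfl

theorem csum_toDigitsCore (f : Nat) : ∀ (n : Nat) (acc : List Char), n < 10 ^ f →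
    csum (Nat.toDigitsCore 10 f n acc) = (dsum n : Int) + csum acc := by
  induction f with
  | zero =>
    intro n acc h
    have hn : n = 0 := by simpa using h
    subst hn
    simp [Nat.toDigitsCore, dsum]
  | succ f ih =>
    intro n acc h
    have hd : csum (Nat.digitChar (n % 10) :: acc) = ((n % 10 : Nat) : Int) + csum acc := by
      simp [csum, digitVal, digitChar_toNat (n % 10) (Nat.mod_lt n (by omega))]
    by_cases h0 : n / 10 = 0
    · have hds : (dsum n : Int) = ((n % 10 : Nat) : Int) := by
        rw [dsum]
        by_cases hz : n = 0
        · simp [hz]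
        · rw [if_neg hz, h0]
          simp [dsum]
      simp only [Nat.toDigitsCore]
      rw [if_pos h0, hd, hds]
    · have hnz : n ≠ 0 := by omega
      have hb : n / 10 < 10 ^ f := by
        rw [Nat.div_lt_iff_lt_mul (by omega)]
        calc n < 10 ^ (f + 1) := h
        _ = 10 ^ f * 10 := by ring
      have hdn : dsum n = n % 10 + dsum (n / 10) := by
        rw [dsum, if_neg hnz]
      simp only [Nat.toDigitsCore]
      rw [if_neg h0, ih (n / 10) _ hb, hd, hdn]
      push_cast
      ring

theorem natLoop_eq (i s : Int) (h : 0 ≤ i) : natLoop i s = s + (dsum i.toNat : Int) := by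
  fun_induction natLoop i s with
  | case1 i s hpos ih =>
    have h10 : (0:Int) < 10 := by norm_num
    rw [ih (by rw [PySem.Int.floordiv_eq_ediv_of_pos h10]; exact Int.ediv_nonneg (by omega) (by norm_num))]
    rw [PySem.Int.floordiv_eq_ediv_of_pos h10, PySem.Int.mod_eq_emod_of_pos h10]
    have h1 : (i / 10).toNat = i.toNat / 10 := by omega
    have hds : dsum i.toNat = i.toNat % 10 + dsum (i.toNat / 10) := by
      rw [dsum, if_neg (by omega : ¬ i.toNat = 0)]
    rw [h1, hds]
    have h2 : i % 10 = ((i.toNat % 10 : Nat) : Int) := by omega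
    rw [h2]
    push_cast
    ring
  | case2 i s hpos =>
    have hz : i = 0 := by omega
    subst hz
    simp [dsum]

theorem natLoop_eq_csum (i : Int) (h : 0 < i) :
    natLoop i 0 = csum (PySem.Int.toChars i) := by
  rw [natLoop_eq i 0 (by omega)]
  have hA : PySem.Int.toChars i = Nat.toDigits 10 i.toNat := by
    simp [PySem.Int.toChars, show ¬ i < 0 by omega]
  rw [hA]
  unfold Nat.toDigits
  rw [csum_toDigitsCore (i.toNat + 1) i.toNat []
    (lt_of_lt_of_le (Nat.lt_pow_self (by norm_num)) (Nat.pow_le_pow_right (by norm_num) (by omega)))]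
  simp [csum]

theorem foldl_natural (x : List Int) (acc : List Int) :
    x.foldl (fun acc i => if 0 < i then acc ++ [natLoop i 0] else acc) acc
    = acc ++ (x.filter (fun i => decide (0 < i))).map
        (fun i => ((PySem.Int.toStr i).toList.map digitVal).sum) := by
  induction x generalizing acc with
  | nil => simp
  | cons i x ih =>
    by_cases hi : 0 < i
    · have hs : natLoop i 0 = ((PySem.Int.toChars i).map digitVal).sum := by
        rw [natLoop_eq_csum i hi]; rfl
      simp [List.foldl, List.filter, hi, ih, hs, PySem.Int.toList_toStr]
    · simp [List.foldl, List.filter, hi, ih]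

-- ===== VERDICT (by name: the statement is the Claim_ definition above) =====
theorem natural_spec : Claim_equal_natural := by
  intro x _
  unfold Spec_natural natural natural_alt
  rw [foldl_natural x []]
  simp
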